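-- pv_equiv track=rewrite | github.com/mckellardw/slide_snake | scripts/py/sc_utils.py | make_unique
-- ===== SOURCE A (Python) =====
-- def make_unique(input_list, delim="-"):
--     count_dict = {}
--     output_list = []
--     for item in input_list:
--         count = count_dict.get(item, 0)
--         if count > 0:
--             unique_item = f"{item}{delim}{count}"
--         else:
--             unique_item = item
--         output_list.append(unique_item)
--         count_dict[item] = count + 1
--     return output_list
-- ===== SOURCE B (Python) =====
-- def make_unique(input_list, delim="-"):
--     # Group-then-assign: collect each item's positions in one pass, then
--     # rewrite every repeated occurrence (j > 0) to f"{item}{delim}{j}".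
--     positions = {}
--     for i, item in enumerate(input_list):
--         positions.setdefault(item, []).append(i)
--     output_list = list(input_list)
--     for item, pos_list in positions.items():
--         for j, p in enumerate(pos_list):
--             if j > 0:
--                 output_list[p] = f"{item}{delim}{j}"
--     return output_list
-- ===== Notes on version B (the rewrite author's own statement) =====
-- stated objective: alternative
-- what changed: Replaced the single running-count pass (dict of counts consulted per element) by a two-phase group-then-assign algorithm: first build an index dict mapping each item to its list of positions, then copy the input and overwrite each repeated occurrence in place with its per-group enumerate index.
import Mathlib
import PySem

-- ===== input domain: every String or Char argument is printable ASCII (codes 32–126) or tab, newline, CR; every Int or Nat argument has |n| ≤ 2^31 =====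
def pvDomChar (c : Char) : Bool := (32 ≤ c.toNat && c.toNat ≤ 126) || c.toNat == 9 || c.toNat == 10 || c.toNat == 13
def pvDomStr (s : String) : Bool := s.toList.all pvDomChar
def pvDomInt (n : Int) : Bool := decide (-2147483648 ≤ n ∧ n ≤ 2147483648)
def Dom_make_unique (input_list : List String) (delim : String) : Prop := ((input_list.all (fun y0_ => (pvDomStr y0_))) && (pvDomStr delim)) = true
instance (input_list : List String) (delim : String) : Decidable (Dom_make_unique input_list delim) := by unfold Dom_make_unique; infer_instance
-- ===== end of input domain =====

-- algorithm (same O(n) cost, different structure); proved to return the same list.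


-- ===== PORT A =====
def make_unique (input_list : List String) (delim : String) : List String :=
  (input_list.foldl
    (fun (st : PySem.Dict String Int × List String) item =>
      let count := st.1.getD item 0
      let unique_item := if count > 0 then item ++ delim ++ PySem.Int.toStr count else item
      (st.1.insert item (count + 1), st.2 ++ [unique_item]))
    (PySem.Dict.empty, [])).2

-- ===== PORT B =====
-- `positions.setdefault(item, []).append(i)` is `d[item] = d.get(item, []) + [i]`,
-- i.e. Dict.modify; `output_list[p] = v` is `List.set p.toNat v` (exact here: every
-- stored position p is an enumerate index, so 0 ≤ p < len(output_list)).
def make_unique_alt (input_list : List String) (delim : String) : List String :=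
  let positions : PySem.Dict String (List Int) :=
    (PySem.List.enumerate input_list 0).foldl
      (fun d p => d.modify p.2 [] (· ++ [p.1])) PySem.Dict.empty
  positions.items.foldl
    (fun output_list g =>
      (PySem.List.enumerate g.2 0).foldl
        (fun o jp =>
          if jp.1 > 0 then o.set jp.2.toNat (g.1 ++ delim ++ PySem.Int.toStr jp.1) else o)
        output_list)
    input_list

-- ===== PRECONDITION & SPEC =====
def Spec_make_unique (input_list : List String) (delim : String) (out : List String) : Prop := out = make_unique_alt input_list delim
instance (input_list : List String) (delim : String) (out : List String) : Decidable (Spec_make_unique input_list delim out) := by unfold Spec_make_unique; infer_instance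

-- ===== CLAIM (what is proved, stated in full; the proofs are below) =====
def Claim_equal_make_unique : Prop := ∀ (input_list : List String) (delim : String), Dom_make_unique input_list delim → Spec_make_unique input_list delim (make_unique input_list delim)

-- ===== LEMMAS AND PROOFS =====

-- the value A writes for an occurrence of `item` preceded by `c` equal items
def pvRename (delim item : String) (c : Int) : String :=
  if c > 0 then item ++ delim ++ PySem.Int.toStr c else item

-- B's inner loop (over one group's position list), start index `s` generalised
def pvInner (delim : String) (out : List String) (item : String) (pl : List Int) (s : Int) : List String :=
  (PySem.List.enumerate pl s).foldl
    (fun o jp => if jp.1 > 0 then o.set jp.2.toNat (item ++ delim ++ PySem.Int.toStr jp.1) else o)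
    out

-- B's outer loop (over the groups)
def pvOuter (delim : String) (out : List String) (groups : List (String × List Int)) : List String :=
  groups.foldl (fun o g => pvInner delim o g.1 g.2 0) out

-- the positions of `item` in `l`
def pvPos (l : List String) (item : String) : List Int :=
  ((PySem.List.enumerate l 0).filter (fun p => p.2 == item)).map (·.1)

def pvGroups (l : List String) : List (String × List Int) :=
  (PySem.Set.ofList l).map (fun it => (it, pvPos l it))

theorem pvInner_nil (delim out item s) : pvInner delim out item [] s = out := rfl

theorem pvInner_cons (delim out item q pl s) :
    pvInner delim out item (q :: pl) s =
      pvInner delim (if s > 0 then out.set q.toNat (item ++ delim ++ PySem.Int.toStr s) else out) item pl (s + 1) := by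
  simp only [pvInner, PySem.List.enumerate_cons, List.foldl_cons]

theorem length_pvInner (delim out item pl s) : (pvInner delim out item pl s).length = out.length := by
  induction pl generalizing out s with
  | nil => rfl
  | cons q pl ih =>
    rw [pvInner_cons]
    rw [ih]
    split_ifs <;> simp

theorem pvInner_append (delim out item pl s) (z : String)
    (h : ∀ p ∈ pl, 0 ≤ p ∧ p < (out.length : Int)) :
    pvInner delim (out ++ [z]) item pl s = pvInner delim out item pl s ++ [z] := by
  induction pl generalizing out s with
  | nil => rfl
  | cons q pl ih =>
    have hq := h q (by simp)
    rw [pvInner_cons, pvInner_cons]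
    split_ifs with hs
    · rw [List.set_append_left _ _ (by omega)]
      rw [ih _ _ (fun p hp => by simpa using h p (by simp [hp]))]
    · exact ih _ _ (fun p hp => h p (by simp [hp]))

theorem pvInner_snoc (delim out item pl s) (z : String)
    (h : ∀ p ∈ pl, 0 ≤ p ∧ p < (out.length : Int)) :
    pvInner delim (out ++ [z]) item (pl ++ [(out.length : Int)]) s =
      pvInner delim out item pl s ++
        [if s + pl.length > 0 then item ++ delim ++ PySem.Int.toStr (s + pl.length) else z] := by
  simp only [pvInner, PySem.List.enumerate_append, List.foldl_append,
    PySem.List.enumerate_cons, PySem.List.enumerate_nil, List.foldl_cons, List.foldl_nil]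
  rw [show ((PySem.List.enumerate pl s).foldl
      (fun o jp => if jp.1 > 0 then o.set jp.2.toNat (item ++ delim ++ PySem.Int.toStr jp.1) else o)
      (out ++ [z])) = pvInner delim (out ++ [z]) item pl s from rfl,
    pvInner_append _ _ _ _ _ _ h]
  have hl : (pvInner delim out item pl s).length = out.length := length_pvInner _ _ _ _ _
  split_ifs with hpos
  · rw [show ((out.length : Int).toNat) = out.length by omega,
      List.set_append_right _ _ (by omega)]
    rw [hl]
    simp only [Nat.sub_self, List.set_cons_zero]
    rfl
  · rfl

theorem length_pvOuter (delim out groups) : (pvOuter delim out groups).length = out.length := by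
  induction groups generalizing out with
  | nil => rfl
  | cons g gs ih => simp [pvOuter, List.foldl_cons] at *; rw [ih, length_pvInner]

theorem pvOuter_append (delim out groups) (z : String)
    (h : ∀ g ∈ groups, ∀ p ∈ g.2, 0 ≤ p ∧ p < (out.length : Int)) :
    pvOuter delim (out ++ [z]) groups = pvOuter delim out groups ++ [z] := by
  induction groups generalizing out with
  | nil => rfl
  | cons g gs ih =>
    simp only [pvOuter, List.foldl_cons]
    rw [pvInner_append _ _ _ _ _ _ (h g (by simp))]
    have := ih (pvInner delim out g.1 g.2 0)
      (fun g' hg' p hp => by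
        rw [length_pvInner]; exact h g' (by simp [hg']) p hp)
    simpa [pvOuter] using this

theorem pvPos_bounds (l item) : ∀ p ∈ pvPos l item, 0 ≤ p ∧ p < (l.length : Int) := by
  intro p hp
  simp only [pvPos, List.mem_map, List.mem_filter] at hp
  obtain ⟨q, ⟨hq, _⟩, rfl⟩ := hp
  rw [PySem.List.mem_enumerate_iff] at hq
  obtain ⟨k, hk, rfl⟩ := hq
  simp; omega

theorem pvPos_append (l y item) :
    pvPos (l ++ [y]) item = pvPos l item ++ if y == item then [(l.length : Int)] else [] := by
  simp only [pvPos, PySem.List.enumerate_append, List.filter_append, List.map_append]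
  congr 1
  simp only [PySem.List.enumerate_cons, PySem.List.enumerate_nil]
  split_ifs with h <;> simp [h]

theorem countP_enumerate (l : List String) (item : String) (s : Int) :
    (PySem.List.enumerate l s).countP (fun p => p.2 == item) = l.countP (fun x => x == item) := by
  induction l generalizing s with
  | nil => rfl
  | cons x xs ih => simp [PySem.List.enumerate_cons, List.countP_cons, ih]

theorem length_pvPos (l item) : (pvPos l item).length = l.count item := by
  simp only [pvPos, List.length_map, ← List.countP_eq_length_filter, List.count]
  exact countP_enumerate l item 0

theorem items_positions (l : List String) :
    ((PySem.List.enumerate l 0).foldl (fun d p => d.modify p.2 [] (· ++ [p.1]))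
        PySem.Dict.empty).items = pvGroups l := by
  set F := (PySem.List.enumerate l 0).foldl (fun d p => d.modify p.2 [] (· ++ [p.1]))
      PySem.Dict.empty with hF
  have hnd : F.keys.Nodup := by
    rw [hF]
    exact PySem.Dict.nodup_keys_foldl_modify_key (PySem.List.enumerate l 0)
      (fun p => p.2) [] (fun _ p => (· ++ [p.1])) PySem.Dict.empty
      (by simp [PySem.Dict.keys_empty])
  have hkeys : F.keys = PySem.Set.ofList l := by
    rw [hF, PySem.Dict.keys_foldl_modify_key]
    simp [PySem.Dict.keys_empty, PySem.List.map_snd_enumerate, PySem.Set.update_nil_left]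
  have hget : ∀ c, F.getD c [] = pvPos l c := by
    intro c
    have hmap : (((PySem.List.enumerate l 0).map (fun p => (p.2, p.1))).foldl
        (fun (d : PySem.Dict String (List Int)) q => d.modify q.1 [] (· ++ [q.2]))
        PySem.Dict.empty) = F := by
      rw [hF, List.foldl_map]
    rw [← hmap, PySem.Dict.getD_foldl_modify_append]
    simp [pvPos, List.filter_map, List.map_map, Function.comp_def, PySem.Dict.getD_empty]
  rw [PySem.Dict.items_eq_map_keys F hnd [], hkeys, pvGroups]
  exact List.map_congr_left (fun it _ => by rw [hget])

theorem B_eq_outer (l : List String) (delim : String) :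
    make_unique_alt l delim = pvOuter delim l (pvGroups l) := by
  show (((PySem.List.enumerate l 0).foldl (fun d p => d.modify p.2 [] (· ++ [p.1]))
      PySem.Dict.empty).items.foldl
      (fun output_list g =>
        (PySem.List.enumerate g.2 0).foldl
          (fun o jp =>
            if jp.1 > 0 then o.set jp.2.toNat (g.1 ++ delim ++ PySem.Int.toStr jp.1) else o)
          output_list)
      l) = pvOuter delim l (pvGroups l)
  rw [items_positions]
  rfl

theorem pvOuter_split (delim out g1 g2) :
    pvOuter delim out (g1 ++ g2) = pvOuter delim (pvOuter delim out g1) g2 := by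
  simp [pvOuter, List.foldl_append]

theorem pvOuter_groups_bounds (_delim : String) (l : List String) (s : List String)
    (out : List String) (hlen : out.length = l.length) :
    ∀ g ∈ s.map (fun it => (it, pvPos l it)), ∀ p ∈ g.2, 0 ≤ p ∧ p < (out.length : Int) := by
  intro g hg p hp
  rw [hlen]
  simp only [List.mem_map] at hg
  obtain ⟨it, _, rfl⟩ := hg
  exact pvPos_bounds l it p hp

theorem B_snoc (l : List String) (y delim : String) :
    make_unique_alt (l ++ [y]) delim =
      make_unique_alt l delim ++ [pvRename delim y (l.count y)] := by
  rw [B_eq_outer, B_eq_outer]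
  have hgf : ∀ s : List String, (∀ it ∈ s, it ≠ y) →
      s.map (fun it => (it, pvPos (l ++ [y]) it)) = s.map (fun it => (it, pvPos l it)) := by
    intro s hs
    apply List.map_congr_left
    intro it hit
    rw [pvPos_append]
    have : (y == it) = false := by simp [(hs it hit).symm]
    simp [this]
  by_cases hy : y ∈ l
  · -- y already occurs in l: its group is extended in place
    have hmem : y ∈ PySem.Set.ofList l := (PySem.Set.mem_ofList l y).mpr hy
    obtain ⟨s₁, s₂, hsplit⟩ := List.append_of_mem hmem
    have hnd : (PySem.Set.ofList l).Nodup := PySem.Set.nodup_ofList l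
    rw [hsplit] at hnd
    obtain ⟨hnd1, hnd2, hdisj⟩ := List.nodup_append.mp hnd
    have hy1 : ∀ it ∈ s₁, it ≠ y := fun it hit heq =>
      hdisj it hit y (List.mem_cons_self ..) heq
    have hy2 : ∀ it ∈ s₂, it ≠ y := fun it hit heq =>
      (List.nodup_cons.mp hnd2).1 (heq ▸ hit)
    have hof : PySem.Set.ofList (l ++ [y]) = s₁ ++ y :: s₂ := by
      rw [PySem.Set.ofList_append_singleton, PySem.Set.add_of_mem hmem, hsplit]
    have hyval : pvPos (l ++ [y]) y = pvPos l y ++ [(l.length : Int)] := by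
      rw [pvPos_append]; simp
    rw [pvGroups, hof, show (s₁ ++ y :: s₂) = s₁ ++ ([y] ++ s₂) from by simp,
      List.map_append, List.map_append, pvOuter_split, pvOuter_split,
      hgf s₁ hy1, hgf s₂ hy2]
    rw [pvGroups, hsplit, show (s₁ ++ y :: s₂) = s₁ ++ ([y] ++ s₂) from by simp,
      List.map_append, List.map_append, pvOuter_split, pvOuter_split]
    -- commute the s₁-part past the appended element
    rw [pvOuter_append delim l (s₁.map (fun it => (it, pvPos l it))) y
      (pvOuter_groups_bounds delim l s₁ l rfl)]
    set O₁ := pvOuter delim l (s₁.map (fun it => (it, pvPos l it))) with hO₁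
    have hO₁len : O₁.length = l.length := length_pvOuter ..
    -- the y-group absorbs the new trailing cell
    have hstep : pvOuter delim (O₁ ++ [y]) ([y].map (fun it => (it, pvPos (l ++ [y]) it))) =
        pvOuter delim O₁ ([y].map (fun it => (it, pvPos l it))) ++
          [pvRename delim y (l.count y)] := by
      simp only [List.map_cons, List.map_nil, pvOuter, List.foldl_cons, List.foldl_nil]
      rw [hyval, show (l.length : Int) = (O₁.length : Int) from by rw [hO₁len]]
      rw [pvInner_snoc delim O₁ y (pvPos l y) 0 y
        (fun p hp => by rw [hO₁len]; exact pvPos_bounds l y p hp)]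
      congr 1
      rw [pvRename]
      simp [length_pvPos]
    rw [hstep]
    -- commute the s₂-part past the appended element
    rw [pvOuter_append delim _ (s₂.map (fun it => (it, pvPos l it)))
      (pvRename delim y (l.count y))
      (pvOuter_groups_bounds delim l s₂ _
        (by rw [show (pvOuter delim O₁ ([y].map (fun it => (it, pvPos l it)))).length =
                O₁.length from length_pvOuter .., hO₁len]))]
  · -- y is new: a fresh singleton group [l.length] is appended
    have hnot : y ∉ PySem.Set.ofList l := fun h => hy ((PySem.Set.mem_ofList l y).mp h)
    have hof : PySem.Set.ofList (l ++ [y]) = PySem.Set.ofList l ++ [y] := by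
      rw [PySem.Set.ofList_append_singleton, PySem.Set.add_of_not_mem hnot]
    have hcnt : l.count y = 0 := List.count_eq_zero.mpr hy
    have hpos0 : pvPos l y = [] := by
      have := length_pvPos l y
      rw [hcnt] at this
      exact List.eq_nil_of_length_eq_zero this
    have hyval : pvPos (l ++ [y]) y = [(l.length : Int)] := by
      rw [pvPos_append, hpos0]; simp
    rw [pvGroups, hof, List.map_append, pvOuter_split,
      hgf (PySem.Set.ofList l) (fun it hit => fun h =>
        hy (h ▸ (PySem.Set.mem_ofList l it).mp hit))]
    rw [pvOuter_append delim l _ y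
      (pvOuter_groups_bounds delim l (PySem.Set.ofList l) l rfl)]
    set O := pvOuter delim l ((PySem.Set.ofList l).map (fun it => (it, pvPos l it))) with hO
    have hOlen : O.length = l.length := length_pvOuter ..
    simp only [List.map_cons, List.map_nil, pvOuter, List.foldl_cons, List.foldl_nil]
    rw [hyval, show ([(l.length : Int)]) = ([] ++ [(O.length : Int)]) from by rw [hOlen]; rfl]
    rw [pvInner_snoc delim O y [] 0 y (by simp)]
    rw [pvInner_nil, pvRename]
    simp only [hcnt, Nat.cast_zero]
    rw [if_neg (by simp)]
    rfl

theorem A_fold_fst (l : List String) (delim : String) (d : PySem.Dict String Int)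
    (out : List String) :
    (l.foldl
      (fun (st : PySem.Dict String Int × List String) item =>
        let count := st.1.getD item 0
        let unique_item := if count > 0 then item ++ delim ++ PySem.Int.toStr count else item
        (st.1.insert item (count + 1), st.2 ++ [unique_item])) (d, out)).1 =
      l.foldl (fun d x => d.insert x (d.getD x 0 + 1)) d := by
  induction l generalizing d out with
  | nil => rfl
  | cons x xs ih => simpa using ih ..

theorem A_snoc (l : List String) (y delim : String) :
    make_unique (l ++ [y]) delim =
      make_unique l delim ++ [pvRename delim y (l.count y)] := by
  unfold make_unique
  rw [List.foldl_append, List.foldl_cons, List.foldl_nil]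
  set st := l.foldl
    (fun (st : PySem.Dict String Int × List String) item =>
      let count := st.1.getD item 0
      let unique_item := if count > 0 then item ++ delim ++ PySem.Int.toStr count else item
      (st.1.insert item (count + 1), st.2 ++ [unique_item])) (PySem.Dict.empty, []) with hst
  have hfst : st.1 = PySem.Dict.counter l := by
    rw [hst, A_fold_fst, PySem.Dict.foldl_insert_getD_add_one_eq_counter]
  change st.2 ++ [if st.1.getD y 0 > 0 then y ++ delim ++ PySem.Int.toStr (st.1.getD y 0)
    else y] = st.2 ++ [pvRename delim y (l.count y)]
  rw [hfst, PySem.Dict.getD_counter, pvRename]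

theorem make_unique_eq (input_list : List String) (delim : String) :
    make_unique input_list delim = make_unique_alt input_list delim := by
  induction input_list using List.reverseRecOn with
  | nil => rfl
  | append_singleton l y ih => rw [A_snoc, B_snoc, ih]

-- ===== VERDICT (by name: the statement is the Claim_ definition above) =====
theorem make_unique_spec : Claim_equal_make_unique := by
  intro input_list delim _
  exact make_unique_eq input_list delim
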